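-- pv_equiv track=rewrite | github.com/pypi-data/pypi-mirror-219 | packages/jetson-adapter-pkg/jetson_adapter_pkg-0.13.4-py3-none-any.whl/frotech_adapter/ledMatrix.py | generate_bitmap
-- ===== SOURCE A (Python) =====
-- def generate_bitmap(data):
--     """生成点阵图数据
--
--     Parameters
--     ----------
--     data : str
--         描述点阵状态的字符串，'1'代表亮，'0'代表灭
--
--     Returns
--     -------
--     list
--         由int型组成的列表，索引号为0的int数据控制第一行的LED，
--         索引号为1的int数据控制第二行的LED，以此类推。
--
--         int数据中的bit0控制最后一个LED，bit1控制倒数第二个LED，以此类推。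
--
--     Examples
--     --------
--     >>> bitmap = '''
--     >>> 10000000 00000001
--     >>> 01000000 00000010
--     >>> 00100000 00000100
--     >>> 00010000 00001000
--     >>> 00001000 00010000
--     >>> 00000100 00100000
--     >>> 00000010 01000000
--     >>> 00000001 10000000
--     >>> '''
--     >>> patterns = dot_led.generate_bitmap(bitmap)
--     >>> dot_led.write(patterns) # 显示自定义图案
--     """
--
--     d = []
--     for line in data.splitlines():
--         byte = 0
--         if len(line) == 0:
--             continue
--         for c in line:
--             if c in '10':
--                 byte <<= 1
--             if c == '1':
--                 byte |= 1
--         d.append(byte)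
--     return d
-- ===== SOURCE B (Python) =====
-- def generate_bitmap(data):
--     return [
--         int(bits, 2) if bits else 0
--         for bits in (
--             ''.join(c for c in line if c in '01')
--             for line in data.splitlines()
--             if line
--         )
--     ]
-- ===== Notes on version B (the rewrite author's own statement) =====
-- stated objective: simpler
-- what changed: Replaces the manual shift/or bit-accumulation loop with a comprehension that filters each kept line down to its bit characters and parses them in one step with int(bits, 2), returning zero when no bit characters remain.
import Mathlib
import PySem

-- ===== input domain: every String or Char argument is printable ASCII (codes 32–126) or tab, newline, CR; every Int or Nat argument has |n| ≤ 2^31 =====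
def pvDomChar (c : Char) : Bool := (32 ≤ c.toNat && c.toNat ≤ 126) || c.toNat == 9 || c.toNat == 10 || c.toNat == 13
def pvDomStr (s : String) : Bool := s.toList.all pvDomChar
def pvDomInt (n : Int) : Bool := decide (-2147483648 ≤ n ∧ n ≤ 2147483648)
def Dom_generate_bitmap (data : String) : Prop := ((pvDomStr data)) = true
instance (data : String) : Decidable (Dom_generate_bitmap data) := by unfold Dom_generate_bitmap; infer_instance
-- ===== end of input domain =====

-- B replaces A's manual shift/or bit-accumulation loop by filter-the-bit-chars then base-2 parse, for simplicity.

-- ===== PORT A =====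
-- body of A's inner character loop: byte <<= 1 on '0'/'1', byte |= 1 on '1'
def pvStepA (byte : Int) (c : Char) : Int :=
  let byte := if c == '1' || c == '0' then Int.shiftLeft byte 1 else byte
  if c == '1' then Int.lor byte 1 else byte

def generate_bitmap (data : String) : List Int :=
  (PySem.Str.splitlines data).foldl (fun d line =>
    if PySem.Str.len line == 0 then d
    else d ++ [line.toList.foldl pvStepA 0]) []

-- ===== PORT B =====
-- one base-2 digit step; pvParseBin = int(bits, 2) (exact on strings of '0'/'1' characters)
def pvStepB (a : Int) (c : Char) : Int := 2 * a + (if c == '1' then 1 else 0)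

def pvParseBin (cs : List Char) : Int := cs.foldl pvStepB 0

def generate_bitmap_alt (data : String) : List Int :=
  ((PySem.Str.splitlines data).filter (fun line => !(line.toList.isEmpty))).map
    (fun line =>
      let bits := line.toList.filter (fun c => c == '0' || c == '1')
      if bits.isEmpty then 0 else pvParseBin bits)

-- ===== PRECONDITION & SPEC =====
def Spec_generate_bitmap (data : String) (out : List Int) : Prop := out = generate_bitmap_alt data
instance (data : String) (out : List Int) : Decidable (Spec_generate_bitmap data out) := by unfold Spec_generate_bitmap; infer_instance

-- ===== CLAIM (what is proved, stated in full; the proofs are below) =====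
def Claim_equal_generate_bitmap : Prop := ∀ (data : String), Dom_generate_bitmap data → Spec_generate_bitmap data (generate_bitmap data)

-- ===== LEMMAS AND PROOFS =====

theorem pv_shl (b : Int) (h : 0 ≤ b) : Int.shiftLeft b 1 = 2 * b := by
  obtain ⟨n, rfl⟩ := Int.eq_ofNat_of_zero_le h
  show Int.shiftLeft (Int.ofNat n) 1 = 2 * Int.ofNat n
  simp [Int.shiftLeft, Nat.shiftLeft_eq]
  ring

theorem pv_nat_or (n : Nat) : 2 * n ||| 1 = 2 * n + 1 := by
  have h := Nat.lor_bit false n true 0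
  simp [Nat.bit_val] at h
  simpa using h

theorem pv_or (b : Int) (h : 0 ≤ b) : Int.lor (2 * b) 1 = 2 * b + 1 := by
  obtain ⟨n, rfl⟩ := Int.eq_ofNat_of_zero_le h
  show Int.lor (Int.ofNat (2 * n)) (Int.ofNat 1) = _
  simp [Int.lor, pv_nat_or]

theorem pvStepA_one (b : Int) (h : 0 ≤ b) : pvStepA b '1' = 2 * b + 1 := by
  simp [pvStepA, pv_shl b h, pv_or b h]

theorem pvStepA_zero (b : Int) (h : 0 ≤ b) : pvStepA b '0' = 2 * b := by
  simp [pvStepA, pv_shl b h]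

theorem pvStepA_other (b : Int) (c : Char) (h1 : c ≠ '1') (h0 : c ≠ '0') :
    pvStepA b c = b := by
  simp [pvStepA, h1, h0]

theorem pvStepB_one (b : Int) : pvStepB b '1' = 2 * b + 1 := by simp [pvStepB]

theorem pvStepB_zero (b : Int) : pvStepB b '0' = 2 * b := by simp [pvStepB]

theorem pvInner_eq (cs : List Char) (b : Int) (h : 0 ≤ b) :
    cs.foldl pvStepA b = (cs.filter (fun c => c == '0' || c == '1')).foldl pvStepB b := by
  induction cs generalizing b with
  | nil => rfl
  | cons c cs ih =>
    rw [List.foldl_cons, List.filter_cons]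
    by_cases h1 : c = '1'
    · subst h1
      rw [pvStepA_one b h]
      simp only [show (('1' : Char) == '0' || ('1' : Char) == '1') = true from rfl, if_true,
        List.foldl_cons, pvStepB_one]
      exact ih _ (by omega)
    · by_cases h0 : c = '0'
      · subst h0
        rw [pvStepA_zero b h]
        simp only [show (('0' : Char) == '0' || ('0' : Char) == '1') = true from rfl, if_true,
          List.foldl_cons, pvStepB_zero]
        exact ih _ (by omega)
      · rw [pvStepA_other b c h1 h0]
        have : (c == '0' || c == '1') = false := by simp [h0, h1]
        rw [this, if_neg (by simp)]
        exact ih b h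

theorem pv_line_eq (line : String) :
    line.toList.foldl pvStepA 0 =
      (let bits := line.toList.filter (fun c => c == '0' || c == '1')
       if bits.isEmpty then 0 else pvParseBin bits) := by
  rw [pvInner_eq _ 0 le_rfl]
  by_cases h : (line.toList.filter (fun c => c == '0' || c == '1')).isEmpty
  · rw [List.isEmpty_iff] at h
    simp [h]
  · have h' : (line.toList.filter (fun c => c == '0' || c == '1')).isEmpty = false := by
      simpa using h
    simp [h', pvParseBin]

theorem pv_len_zero_iff (l : String) : (PySem.Str.len l == 0) = l.toList.isEmpty := by
  rw [PySem.Str.len_eq]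
  rcases l.toList with _ | ⟨c, cs⟩ <;> simp <;> omega

theorem pv_foldl_eq (ls : List String) (acc : List Int) :
    ls.foldl (fun d line =>
      if PySem.Str.len line == 0 then d else d ++ [line.toList.foldl pvStepA 0]) acc =
    acc ++ (ls.filter (fun line => !(line.toList.isEmpty))).map
      (fun line =>
        let bits := line.toList.filter (fun c => c == '0' || c == '1')
        if bits.isEmpty then 0 else pvParseBin bits) := by
  induction ls generalizing acc with
  | nil => simp
  | cons l ls ih =>
    rw [List.foldl_cons, List.filter_cons]
    by_cases h : l.toList.isEmpty
    · rw [if_pos (by rw [pv_len_zero_iff, h]), if_neg (by simp [h]), ih]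
    · rw [if_neg (by rw [pv_len_zero_iff]; simp [h]), if_pos (by simp [h]), List.map_cons, ih,
        pv_line_eq]
      simp

-- ===== VERDICT (by name: the statement is the Claim_ definition above) =====
theorem generate_bitmap_spec : Claim_equal_generate_bitmap := by
  intro data _
  show generate_bitmap data = generate_bitmap_alt data
  unfold generate_bitmap generate_bitmap_alt
  rw [pv_foldl_eq]
  simp
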